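-- pv_equiv track=rewrite | github.com/samoylenkodmitry/s-a--m.github.io | scripts/generate_leetcode_library.py | normalize_problem_page_lines
-- ===== SOURCE A (Python) =====
-- def normalize_problem_page_lines(lines: list[str]) -> list[str]:
--     filtered: list[str] = []
--     previous_blank = False
--     for line in lines:
--         if line.strip() == "https://dmitrysamoylenko.com/2023/07/14/leetcode_daily.html":
--             continue
--         is_blank = not line.strip()
--         if is_blank and previous_blank and filtered and not filtered[-1].strip():
--             continue
--         filtered.append(line.rstrip())
--         previous_blank = is_blank
--     return filtered
-- ===== SOURCE B (Python) =====
-- URL = "https://dmitrysamoylenko.com/2023/07/14/leetcode_daily.html"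
--
--
-- def normalize_problem_page_lines(lines: list[str]) -> list[str]:
--     # Pass 1: drop URL lines and rstrip everything.
--     kept = [ln.rstrip() for ln in lines if ln.strip() != URL]
--     # Pass 2: collapse each run of blank (now empty) lines to a single "".
--     out: list[str] = []
--     i = 0
--     n = len(kept)
--     while i < n:
--         if kept[i]:
--             out.append(kept[i])
--             i += 1
--         else:
--             out.append("")
--             while i < n and not kept[i]:
--                 i += 1
--     return out
-- ===== Notes on version B (the rewrite author's own statement) =====
-- stated objective: simpler
-- what changed: Replaces A's single stateful loop (previous_blank flag plus inspection of filtered[-1]) by two plain passes: a comprehension that drops URL lines and rstrips, then a run-skipping scan that emits one empty string per blank run.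
import Mathlib
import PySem

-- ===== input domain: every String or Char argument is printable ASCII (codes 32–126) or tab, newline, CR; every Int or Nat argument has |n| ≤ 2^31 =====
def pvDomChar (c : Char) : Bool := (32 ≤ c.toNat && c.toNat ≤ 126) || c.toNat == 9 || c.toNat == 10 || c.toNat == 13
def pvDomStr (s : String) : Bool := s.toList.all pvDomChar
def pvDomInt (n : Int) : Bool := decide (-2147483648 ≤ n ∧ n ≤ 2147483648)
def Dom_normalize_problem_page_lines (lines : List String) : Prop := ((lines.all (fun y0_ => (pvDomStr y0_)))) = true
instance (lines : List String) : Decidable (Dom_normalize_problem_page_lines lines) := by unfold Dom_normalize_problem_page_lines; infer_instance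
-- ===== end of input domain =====

-- B replaces A's single stateful loop by two plain passes (filter+rstrip, then blank-run collapsing); objective: simpler.

-- the module-level URL constant both versions compare against
def pvURL : String := "https://dmitrysamoylenko.com/2023/07/14/leetcode_daily.html"

-- ===== PORT A =====
-- A's for-loop over `lines` with state (filtered, previous_blank), step for step.
def pvStepA (st : List String × Bool) (line : String) : List String × Bool :=
  let filtered := st.1
  let previous_blank := st.2
  if PySem.Str.strip line == pvURL then st
  else
    let is_blank : Bool := PySem.Str.strip line == ""
    if is_blank && previous_blank && !filtered.isEmpty
        && (PySem.Str.strip (filtered.getLastD "") == "") then st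
    else (filtered ++ [PySem.Str.rstrip line], is_blank)

def normalize_problem_page_lines (lines : List String) : List String :=
  (lines.foldl pvStepA ([], false)).1

-- ===== PORT B =====
-- Source B's second pass: the while-loop over the index is ported as recursion on the
-- remaining suffix; the inner blank-skipping while-loop is dropWhile.
def pvCollapse : List String → List String
  | [] => []
  | x :: xs =>
    if x ≠ "" then x :: pvCollapse xs
    else "" :: pvCollapse (xs.dropWhile (fun l => l == ""))
termination_by l => l.length
decreasing_by
  · simp
  · exact Nat.lt_succ_of_le (List.length_dropWhile_le _ _)

def normalize_problem_page_lines_alt (lines : List String) : List String :=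
  pvCollapse ((lines.filter (fun ln => !(PySem.Str.strip ln == pvURL))).map PySem.Str.rstrip)

-- ===== PRECONDITION & SPEC =====
def Spec_normalize_problem_page_lines (lines : List String) (out : List String) : Prop := out = normalize_problem_page_lines_alt lines
instance (lines : List String) (out : List String) : Decidable (Spec_normalize_problem_page_lines lines out) := by unfold Spec_normalize_problem_page_lines; infer_instance

-- ===== CLAIM (what is proved, stated in full; the proofs are below) =====
def Claim_equal_normalize_problem_page_lines : Prop := ∀ (lines : List String), Dom_normalize_problem_page_lines lines → Spec_normalize_problem_page_lines lines (normalize_problem_page_lines lines)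

-- ===== LEMMAS AND PROOFS =====

-- a string strips to "" iff it rstrips to "" (both say: all characters are whitespace)
theorem pvRstripNilIff (cs : List Char) :
    PySem.Chars.rstrip cs = [] ↔ cs.all PySem.Chars.isspace := by
  simp [PySem.Chars.rstrip, List.dropWhile_eq_nil_iff, List.all_eq_true]

theorem pvLstripAll (cs : List Char) :
    (PySem.Chars.lstrip cs).all PySem.Chars.isspace = cs.all PySem.Chars.isspace := by
  induction cs with
  | nil => rfl
  | cons c cs ih =>
    by_cases h : PySem.Chars.isspace c = true
    · simp [PySem.Chars.lstrip, h] at ih ⊢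
      rw [ih]
    · simp [PySem.Chars.lstrip, h]

theorem pvStripNilIff (cs : List Char) :
    PySem.Chars.strip cs = [] ↔ cs.all PySem.Chars.isspace := by
  unfold PySem.Chars.strip
  rw [pvRstripNilIff, pvLstripAll]

theorem pvOfListEmpty (xs : List Char) : (String.ofList xs = "") ↔ xs = [] := by
  constructor
  · intro h; have := congrArg String.toList h; simpa using this
  · intro h; subst h; rfl

theorem pvStripEmptyIffRstrip (s : String) :
    (PySem.Str.strip s == "") = (PySem.Str.rstrip s == "") := by
  simp only [PySem.Str.strip, PySem.Str.rstrip]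
  rw [Bool.eq_iff_iff]
  simp only [beq_iff_eq, pvOfListEmpty, pvStripNilIff, pvRstripNilIff]

-- the invariant A's loop maintains: previous_blank says the last appended line is blank
def pvInv (st : List String × Bool) : Prop :=
  st.2 = true → st.1 ≠ [] ∧ PySem.Str.strip (st.1.getLastD "") == ""

-- what B's second pass does, parameterised by whether we are inside a blank run
def pvH (pb : Bool) (ks : List String) : List String :=
  if pb then pvCollapse (ks.dropWhile (fun l => l == "")) else pvCollapse ks

theorem pvRstripBlank (line : String) (hb : (PySem.Str.strip line == "") = true) :
    PySem.Str.rstrip line = "" := by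
  have h := pvStripEmptyIffRstrip line
  rw [hb] at h
  exact beq_iff_eq.mp h.symm

theorem pvRstripNonBlank (line : String) (hb : (PySem.Str.strip line == "") = false) :
    ¬ PySem.Str.rstrip line = "" := by
  have h := pvStripEmptyIffRstrip line
  rw [hb] at h
  intro he
  rw [he] at h
  simp at h

theorem pvMain (lines : List String) : ∀ (acc : List String) (pb : Bool), pvInv (acc, pb) →
    (lines.foldl pvStepA (acc, pb)).1
      = acc ++ pvH pb ((lines.filter (fun ln => !(PySem.Str.strip ln == pvURL))).map PySem.Str.rstrip) := by
  induction lines with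
  | nil => intro acc pb _; simp [pvH, pvCollapse]
  | cons line rest ih =>
    intro acc pb hinv
    by_cases hurl : (PySem.Str.strip line == pvURL) = true
    · -- URL line: skipped by A, filtered out by B
      have hstep : pvStepA (acc, pb) line = (acc, pb) := by simp [pvStepA, hurl]
      simp only [List.foldl_cons, hstep, List.filter_cons, hurl, Bool.not_true, if_neg Bool.false_ne_true]
      exact ih acc pb hinv
    · by_cases hb : (PySem.Str.strip line == "") = true
      · by_cases hpb : pb = true
        · -- blank after blank: skipped by A, collapsed by B
          obtain ⟨hne, hlast⟩ := hinv hpb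
          simp only [List.getLastD_eq_getLast?, beq_iff_eq] at hlast
          have hstep : pvStepA (acc, pb) line = (acc, pb) := by
            simp [pvStepA, hurl, hb, hpb, hne, hlast]
          have hr : PySem.Str.rstrip line = "" := pvRstripBlank line hb
          simp only [List.foldl_cons, hstep, List.filter_cons, hurl, Bool.not_false]
          rw [ih acc pb hinv, hpb]
          simp [pvH, hr]
        · -- first blank of a run: appended (as "") by both
          have hpb' : pb = false := by cases pb <;> simp_all
          have hr : PySem.Str.rstrip line = "" := pvRstripBlank line hb
          have hstep : pvStepA (acc, pb) line = (acc ++ [PySem.Str.rstrip line], true) := by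
            simp [pvStepA, hurl, hb, hpb']
          have hinv' : pvInv (acc ++ [PySem.Str.rstrip line], true) := by
            intro _
            refine ⟨by simp, ?_⟩
            simp [hr]
            decide
          simp only [List.foldl_cons, hstep, List.filter_cons, hurl, Bool.not_false]
          rw [ih _ true hinv', hpb', hr]
          simp [pvH, pvCollapse, hr]
      · -- non-blank line: appended by both
        have hr : ¬ PySem.Str.rstrip line = "" := pvRstripNonBlank line (by cases h : (PySem.Str.strip line == "") <;> simp_all)
        have hstep : pvStepA (acc, pb) line = (acc ++ [PySem.Str.rstrip line], false) := by
          simp [pvStepA, hurl, hb]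
        have hinv' : pvInv (acc ++ [PySem.Str.rstrip line], false) := by
          intro h; simp at h
        simp only [List.foldl_cons, hstep, List.filter_cons, hurl, Bool.not_false]
        rw [ih _ false hinv']
        cases hpb : pb
        · simp [pvH, pvCollapse, hr]
        · simp [pvH, pvCollapse, hr]

-- ===== VERDICT (by name: the statement is the Claim_ definition above) =====
theorem normalize_problem_page_lines_spec : Claim_equal_normalize_problem_page_lines := by
  intro lines _
  unfold Spec_normalize_problem_page_lines normalize_problem_page_lines normalize_problem_page_lines_alt
  rw [pvMain lines [] false (by intro h; simp at h)]
  simp [pvH]
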